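-- pv_equiv track=rewrite | github.com/PirateEra/Multimedia-Analytics | g_retriever_m/infer_sample.py | multiple_queries
-- ===== SOURCE A (Python) =====
-- def multiple_queries(query: str, n: int = 2) -> dict:
--     words = query.strip().split()
--     variants = {}
--
--     # Split into non-overlapping n-grams
--     chunks = [words[i:i+n] for i in range(0, len(words), n)]
--
--     for i, chunk in enumerate(chunks):
--         removed_ngram = " ".join(chunk)
--         # Reconstruct query without this chunk
--         remaining_chunks = chunks[:i] + chunks[i+1:]
--         remaining_words = [word for group in remaining_chunks for word in group]
--         modified_query = " ".join(remaining_words)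
--         variants[removed_ngram] = modified_query
--
--     return variants
-- ===== SOURCE B (Python) =====
-- def multiple_queries(query: str, n: int = 2) -> dict:
--     words = query.strip().split()
--     # one pass: n-gram strings, then joined prefix/suffix accumulators, combined per index
--     chunk_strs = [" ".join(words[i:i + n]) for i in range(0, len(words), n)]
--     prefix = [""]
--     for c in chunk_strs:
--         prefix.append(c if not prefix[-1] else prefix[-1] + " " + c)
--     suffix = [""]
--     for c in reversed(chunk_strs):
--         suffix.append(c if not suffix[-1] else c + " " + suffix[-1])
--     suffix.reverse()
--     variants = {}
--     for c, p, s in zip(chunk_strs, prefix, suffix[1:]):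
--         variants[c] = p + " " + s if p and s else (p or s)
--     return variants
-- ===== Notes on version B (the rewrite author's own statement) =====
-- stated objective: alternative
-- what changed: Instead of rebuilding and re-joining the full remaining word list for every chunk, B joins each n-gram once and accumulates joined prefix/suffix strings in two linear passes, combining prefix[i] and suffix[i+1] per index.
-- outside the precondition, e.g. on multiple_queries('a b c', 0): A raises ValueError, B raises ValueError
import Mathlib
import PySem

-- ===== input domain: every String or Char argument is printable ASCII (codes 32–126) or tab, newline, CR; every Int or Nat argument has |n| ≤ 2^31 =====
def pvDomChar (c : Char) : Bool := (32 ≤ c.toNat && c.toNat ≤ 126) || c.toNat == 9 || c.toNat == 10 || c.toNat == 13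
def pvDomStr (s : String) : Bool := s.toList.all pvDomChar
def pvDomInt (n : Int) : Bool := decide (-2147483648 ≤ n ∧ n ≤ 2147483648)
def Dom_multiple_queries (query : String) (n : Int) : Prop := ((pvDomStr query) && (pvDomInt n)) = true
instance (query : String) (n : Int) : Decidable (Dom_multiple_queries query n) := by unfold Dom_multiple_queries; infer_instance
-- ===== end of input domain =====

-- B replaces A's per-chunk rebuild-and-rejoin of all remaining words by precomputed joined
-- prefix/suffix accumulators combined per index (alternative single-pass decomposition).


-- ===== PORT A =====
def multiple_queries (query : String) (n : Int) : List (String × String) :=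
  let words := PySem.Str.split₀ (PySem.Str.strip query)
  let chunks := (PySem.List.pyRange 0 (words.length : Int) n).map
    (fun i => PySem.List.slice words (some i) (some (i + n)))
  ((PySem.List.enumerate chunks).foldl
    (fun (d : PySem.Dict String String) p =>
      let removed_ngram := PySem.Str.join " " p.2
      let remaining_chunks := PySem.List.slice chunks none (some p.1) ++
                              PySem.List.slice chunks (some (p.1 + 1)) none
      let remaining_words := remaining_chunks.flatMap (fun group => group)
      d.insert removed_ngram (PySem.Str.join " " remaining_words))
    PySem.Dict.empty).items

-- ===== PORT B =====
def multiple_queries_alt (query : String) (n : Int) : List (String × String) :=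
  let words := PySem.Str.split₀ (PySem.Str.strip query)
  let chunkStrs := (PySem.List.pyRange 0 (words.length : Int) n).map
    (fun i => PySem.Str.join " " (PySem.List.slice words (some i) (some (i + n))))
  let pre := chunkStrs.foldl
    (fun (acc : List String) c =>
      acc ++ [if acc.getLast! = "" then c else acc.getLast! ++ " " ++ c]) [""]
  let suf := (chunkStrs.reverse.foldl
    (fun (acc : List String) c =>
      acc ++ [if acc.getLast! = "" then c else c ++ " " ++ acc.getLast!]) [""]).reverse
  ((chunkStrs.zip (pre.zip (PySem.List.slice suf (some 1) none))).foldl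
    (fun (d : PySem.Dict String String) t =>
      d.insert t.1 (if t.2.1 ≠ "" ∧ t.2.2 ≠ "" then t.2.1 ++ " " ++ t.2.2
                    else if t.2.1 ≠ "" then t.2.1 else t.2.2))
    PySem.Dict.empty).items

-- ===== PRECONDITION & SPEC =====
-- Pre_ excludes exactly n = 0, where Python's range(0, len(words), 0) raises ValueError (in A and in B alike).
def Pre_multiple_queries (query : String) (n : Int) : Prop := n ≠ 0
instance (query : String) (n : Int) : Decidable (Pre_multiple_queries query n) := by unfold Pre_multiple_queries; infer_instance
def pvWitness_multiple_queries : String × Int := ("a b c", 2)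

def Spec_multiple_queries (query : String) (n : Int) (out : List (String × String)) : Prop := out = multiple_queries_alt query n
instance (query : String) (n : Int) (out : List (String × String)) : Decidable (Spec_multiple_queries query n out) := by unfold Spec_multiple_queries; infer_instance

-- ===== CLAIM (what is proved, stated in full; the proofs are below) =====
def Claim_equal_multiple_queries : Prop := ∀ (query : String) (n : Int), Dom_multiple_queries query n → Pre_multiple_queries query n → Spec_multiple_queries query n (multiple_queries query n)

-- ===== LEMMAS AND PROOFS =====

theorem pv_chars_join_append (sep : List Char) (xs ys : List (List Char))
    (hx : xs ≠ []) (hy : ys ≠ []) :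
    PySem.Chars.join sep (xs ++ ys) = PySem.Chars.join sep xs ++ sep ++ PySem.Chars.join sep ys := by
  induction xs with
  | nil => exact absurd rfl hx
  | cons a t ih =>
    cases t with
    | nil =>
      cases ys with
      | nil => exact absurd rfl hy
      | cons y ys' => simp [PySem.Chars.join_singleton, PySem.Chars.join_cons_cons]
    | cons b t' =>
      have : ((b :: t') ++ ys) = b :: (t' ++ ys) := rfl
      simp only [List.cons_append, PySem.Chars.join_cons_cons]
      rw [show (b :: (t' ++ ys)) = (b :: t') ++ ys from rfl, ih (by simp) ]
      simp [List.append_assoc]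

theorem pv_join_nil : PySem.Str.join " " ([] : List String) = "" := by decide

theorem pv_join_singleton (c : String) : PySem.Str.join " " [c] = c := by
  apply String.toList_inj.mp
  simp [PySem.Str.toList_join, PySem.Chars.join_singleton]

theorem pv_join_append_of_ne (xs ys : List String) (hx : xs ≠ []) (hy : ys ≠ []) :
    PySem.Str.join " " (xs ++ ys) = PySem.Str.join " " xs ++ " " ++ PySem.Str.join " " ys := by
  apply String.toList_inj.mp
  simp only [PySem.Str.toList_join, String.toList_append, List.map_append]
  exact pv_chars_join_append _ _ _ (by simpa using hx) (by simpa using hy)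

theorem pv_join_ne_empty (c : List String) (hc : c ≠ []) (h : ∀ w ∈ c, w ≠ "") :
    PySem.Str.join " " c ≠ "" := by
  cases c with
  | nil => exact absurd rfl hc
  | cons w t =>
    have hw : w ≠ "" := h w (by simp)
    cases t with
    | nil => simpa [pv_join_singleton] using hw
    | cons b t' =>
      rw [show w :: b :: t' = [w] ++ (b :: t') from rfl,
          pv_join_append_of_ne _ _ (by simp) (by simp), pv_join_singleton]
      intro hcon
      apply hw
      apply String.toList_inj.mp
      have := congrArg String.toList hcon
      simp [String.toList_append] at this

theorem pv_join_combine (xs ys : List String) (hx : ∀ c ∈ xs, c ≠ "") (hy : ∀ c ∈ ys, c ≠ "") :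
    PySem.Str.join " " (xs ++ ys) =
      (if PySem.Str.join " " xs ≠ "" ∧ PySem.Str.join " " ys ≠ ""
       then PySem.Str.join " " xs ++ " " ++ PySem.Str.join " " ys
       else if PySem.Str.join " " xs ≠ "" then PySem.Str.join " " xs
       else PySem.Str.join " " ys) := by
  cases xs with
  | nil => simp [pv_join_nil]
  | cons a t =>
    have hxne : PySem.Str.join " " (a :: t) ≠ "" := pv_join_ne_empty _ (by simp) hx
    cases ys with
    | nil => simp [pv_join_nil, hxne]
    | cons b u =>
      have hyne : PySem.Str.join " " (b :: u) ≠ "" := pv_join_ne_empty _ (by simp) hy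
      rw [pv_join_append_of_ne _ _ (by simp) (by simp)]
      simp [hxne, hyne]

theorem pv_join_flatten (L : List (List String)) (h : ∀ c ∈ L, c ≠ []) :
    PySem.Str.join " " L.flatten = PySem.Str.join " " (L.map (PySem.Str.join " ")) := by
  induction L with
  | nil => simp
  | cons c t ih =>
    cases t with
    | nil => simp [pv_join_singleton]
    | cons d t' =>
      have hflat : (List.flatten (d :: t')) ≠ [] := by
        have hd : d ≠ [] := h d (by simp)
        cases d with
        | nil => exact absurd rfl hd
        | cons w dw => simp
      have hc : c ≠ [] := h c (by simp)
      rw [List.flatten_cons, pv_join_append_of_ne _ _ hc hflat,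
          ih (fun x hx => h x (by simp [hx])), List.map_cons,
          show ((c :: d :: t').map (PySem.Str.join " ")) = [PySem.Str.join " " c] ++ ((d :: t').map (PySem.Str.join " ")) from rfl,
          pv_join_append_of_ne _ _ (by simp) (by simp), pv_join_singleton]
      simp

theorem pv_split₀_go_ne_nil (s cur : List Char) (acc : List (List Char)) (hacc : ∀ w ∈ acc, w ≠ []) :
    ∀ w ∈ PySem.Chars.split₀.go s cur acc, w ≠ [] := by
  induction s generalizing cur acc with
  | nil =>
    intro w hw
    by_cases hcur : cur.isEmpty
    · rw [PySem.Chars.split₀.go] at hw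
      simp [hcur] at hw
      exact hacc w hw
    · rw [PySem.Chars.split₀.go] at hw
      simp [hcur] at hw
      rcases hw with h1 | h2
      · exact hacc w h1
      · subst h2; simpa using (by simpa [List.isEmpty_iff] using hcur : cur ≠ [])
  | cons c rest ih =>
    intro w hw
    rw [PySem.Chars.split₀.go] at hw
    by_cases hsp : PySem.Chars.isspace c
    · by_cases hcur : cur.isEmpty
      · simp [hsp, hcur] at hw
        exact ih [] acc hacc w hw
      · simp [hsp, hcur] at hw
        refine ih [] (cur.reverse :: acc) ?_ w hw
        intro v hv
        rcases List.mem_cons.mp hv with h1 | h2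
        · subst h1; simpa using (by simpa [List.isEmpty_iff] using hcur : cur ≠ [])
        · exact hacc v h2
    · simp [hsp] at hw
      exact ih (c :: cur) acc hacc w hw

theorem pv_split₀_ne_empty (s : String) : ∀ w ∈ PySem.Str.split₀ s, w ≠ "" := by
  intro w hw hcon
  have h1 : w.toList ∈ (PySem.Str.split₀ s).map String.toList := List.mem_map_of_mem hw
  rw [PySem.Str.split₀_map_toList] at h1
  have := pv_split₀_go_ne_nil s.toList [] [] (by simp) w.toList h1
  subst hcon
  simp at this

theorem pv_getLast!_concat {α : Type} [Inhabited α] (l : List α) (x : α) : (l ++ [x]).getLast! = x := by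
  cases l with
  | nil => simp [List.getLast!]
  | cons a t =>
    rw [List.cons_append]
    simp only [List.getLast!]
    exact (List.getLast_congr _ _ (show a :: (t ++ [x]) = (a :: t) ++ [x] from rfl)).trans List.getLast_concat

theorem pv_prefix_spec (cs : List String) (h : ∀ c ∈ cs, c ≠ "") :
    cs.foldl (fun (acc : List String) c =>
        acc ++ [if acc.getLast! = "" then c else acc.getLast! ++ " " ++ c]) [""] =
      (List.range (cs.length + 1)).map (fun j => PySem.Str.join " " (cs.take j)) := by
  induction cs using List.reverseRecOn with
  | nil => simp [pv_join_nil]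
  | append_singleton t c ih =>
    have ht : ∀ x ∈ t, x ≠ "" := fun x hx => h x (by simp [hx])
    rw [List.foldl_append, ih ht]
    have hlast : ((List.range (t.length + 1)).map (fun j => PySem.Str.join " " (t.take j))).getLast! = PySem.Str.join " " t := by
      rw [List.range_succ, List.map_append]
      simp
    simp only [List.foldl_cons, List.foldl_nil, hlast]
    rw [List.length_append, List.length_singleton]
    rw [show t.length + 1 + 1 = (t.length + 1) + 1 from rfl, List.range_succ (n := t.length + 1), List.map_append]
    have hmap : (List.range (t.length + 1)).map (fun j => PySem.Str.join " " ((t ++ [c]).take j)) =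
        (List.range (t.length + 1)).map (fun j => PySem.Str.join " " (t.take j)) := by
      apply List.map_congr_left
      intro j hj
      rw [List.take_append_of_le_length (by simpa using Nat.lt_succ_iff.mp (List.mem_range.mp hj))]
    rw [hmap]
    congr 1
    by_cases hte : t = []
    · subst hte
      simp [pv_join_nil, pv_join_singleton]
    · have hne : PySem.Str.join " " t ≠ "" := pv_join_ne_empty t hte ht
      simp only [List.map_cons, List.map_nil]
      rw [List.take_of_length_le (by simp), pv_join_append_of_ne t [c] hte (by simp)]
      simp [hne]
      exact (pv_join_singleton c).symm

theorem pv_suffix_spec (cs : List String) (h : ∀ c ∈ cs, c ≠ "") :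
    cs.reverse.foldl (fun (acc : List String) c =>
        acc ++ [if acc.getLast! = "" then c else c ++ " " ++ acc.getLast!]) [""] =
      ((List.range (cs.length + 1)).map (fun j => PySem.Str.join " " (cs.drop j))).reverse := by
  induction cs with
  | nil => simp [pv_join_nil]
  | cons c t ih =>
    have ht : ∀ x ∈ t, x ≠ "" := fun x hx => h x (by simp [hx])
    rw [List.reverse_cons, List.foldl_append, ih ht]
    simp only [List.foldl_cons, List.foldl_nil]
    have hlast : (((List.range (t.length + 1)).map (fun j => PySem.Str.join " " (t.drop j))).reverse).getLast! = PySem.Str.join " " t := by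
      rw [List.range_succ_eq_map, List.map_cons, List.reverse_cons, pv_getLast!_concat]
      simp
    rw [hlast]
    have hT : (List.range ((c :: t).length + 1)).map (fun j => PySem.Str.join " " ((c :: t).drop j)) =
        PySem.Str.join " " (c :: t) :: (List.range (t.length + 1)).map (fun j => PySem.Str.join " " (t.drop j)) := by
      rw [show (c :: t).length + 1 = (t.length + 1) + 1 by simp, List.range_succ_eq_map, List.map_cons, List.map_map]
      simp [Function.comp_def, Nat.succ_eq_add_one]
    rw [hT, List.reverse_cons]
    congr 1
    by_cases hte : t = []
    · subst hte
      simp [pv_join_nil, pv_join_singleton]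
    · have hne : PySem.Str.join " " t ≠ "" := pv_join_ne_empty t hte ht
      rw [show (c :: t) = [c] ++ t from rfl, pv_join_append_of_ne [c] t (by simp) hte, pv_join_singleton]
      simp [hne]

theorem pv_value_eq (chunks : List (List String)) (j : Nat)
    (hc : ∀ c ∈ chunks, c ≠ []) (hw : ∀ c ∈ chunks, ∀ w ∈ c, w ≠ "") :
    PySem.Str.join " " ((chunks.take j ++ chunks.drop (j + 1)).flatMap id) =
      (if PySem.Str.join " " ((chunks.map (PySem.Str.join " ")).take j) ≠ "" ∧
          PySem.Str.join " " ((chunks.map (PySem.Str.join " ")).drop (j + 1)) ≠ ""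
       then PySem.Str.join " " ((chunks.map (PySem.Str.join " ")).take j) ++ " " ++
            PySem.Str.join " " ((chunks.map (PySem.Str.join " ")).drop (j + 1))
       else if PySem.Str.join " " ((chunks.map (PySem.Str.join " ")).take j) ≠ ""
       then PySem.Str.join " " ((chunks.map (PySem.Str.join " ")).take j)
       else PySem.Str.join " " ((chunks.map (PySem.Str.join " ")).drop (j + 1))) := by
  have hmem : ∀ c ∈ chunks.take j ++ chunks.drop (j + 1), c ∈ chunks := by
    intro c hcm
    rcases List.mem_append.mp hcm with h1 | h2
    · exact List.mem_of_mem_take h1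
    · exact List.mem_of_mem_drop h2
  rw [List.flatMap_id, pv_join_flatten _ (fun c hcm => hc c (hmem c hcm))]
  rw [List.map_append, List.map_take, List.map_drop]
  have hne : ∀ x ∈ chunks.map (PySem.Str.join " "), x ≠ "" := by
    intro x hx
    rcases List.mem_map.mp hx with ⟨c, hcm, rfl⟩
    exact pv_join_ne_empty c (hc c hcm) (hw c hcm)
  exact pv_join_combine _ _
    (fun x hx => hne x (List.mem_of_mem_take hx))
    (fun x hx => hne x (List.mem_of_mem_drop hx))

theorem pv_main (chunks : List (List String))
    (hc : ∀ c ∈ chunks, c ≠ []) (hw : ∀ c ∈ chunks, ∀ w ∈ c, w ≠ "") :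
    (List.foldl
      (fun (d : PySem.Dict String String) p =>
        d.insert (PySem.Str.join " " p.2)
          (PySem.Str.join " " (List.flatMap (fun group => group)
            (PySem.List.slice chunks none (some p.1) ++
             PySem.List.slice chunks (some (p.1 + 1)) none))))
      PySem.Dict.empty (PySem.List.enumerate chunks 0)).items =
    (List.foldl
      (fun (d : PySem.Dict String String) t =>
        d.insert t.1 (if t.2.1 ≠ "" ∧ t.2.2 ≠ "" then t.2.1 ++ " " ++ t.2.2
                      else if t.2.1 ≠ "" then t.2.1 else t.2.2))
      PySem.Dict.empty
      (List.zip (chunks.map (PySem.Str.join " "))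
        (List.zip
          (List.foldl (fun (acc : List String) c =>
              acc ++ [if acc.getLast! = "" then c else acc.getLast! ++ " " ++ c]) [""]
            (chunks.map (PySem.Str.join " ")))
          (PySem.List.slice
            (List.reverse (List.foldl (fun (acc : List String) c =>
                acc ++ [if acc.getLast! = "" then c else c ++ " " ++ acc.getLast!]) [""]
              (List.reverse (chunks.map (PySem.Str.join " ")))))
            (some 1) none)))).items := by
  set cs := chunks.map (PySem.Str.join " ") with hcs
  have hcsne : ∀ x ∈ cs, x ≠ "" := by
    intro x hx
    rcases List.mem_map.mp hx with ⟨c, hcm, rfl⟩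
    exact pv_join_ne_empty c (hc c hcm) (hw c hcm)
  have hm : cs.length = chunks.length := by simp [hcs]
  rw [pv_prefix_spec cs hcsne, pv_suffix_spec cs hcsne, List.reverse_reverse]
  rw [PySem.List.slice_from _ (show (0:Int) ≤ 1 by norm_num), show ((1:Int)).toNat = 1 from rfl]
  rw [show List.foldl
      (fun (d : PySem.Dict String String) p =>
        d.insert (PySem.Str.join " " p.2)
          (PySem.Str.join " " (List.flatMap (fun group => group)
            (PySem.List.slice chunks none (some p.1) ++
             PySem.List.slice chunks (some (p.1 + 1)) none))))
      PySem.Dict.empty (PySem.List.enumerate chunks 0) =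
    List.foldl (fun (d : PySem.Dict String String) q => d.insert q.1 q.2)
      PySem.Dict.empty
      ((PySem.List.enumerate chunks 0).map
        (fun p => (PySem.Str.join " " p.2,
          PySem.Str.join " " (List.flatMap (fun group => group)
            (PySem.List.slice chunks none (some p.1) ++
             PySem.List.slice chunks (some (p.1 + 1)) none)))))
    from (List.foldl_map
      (f := fun (p : Int × List String) => (PySem.Str.join " " p.2,
          PySem.Str.join " " (List.flatMap (fun group => group)
            (PySem.List.slice chunks none (some p.1) ++
             PySem.List.slice chunks (some (p.1 + 1)) none))))
      (g := fun (d : PySem.Dict String String) q => d.insert q.1 q.2)).symm]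
  rw [show List.foldl
      (fun (d : PySem.Dict String String) t =>
        d.insert t.1 (if t.2.1 ≠ "" ∧ t.2.2 ≠ "" then t.2.1 ++ " " ++ t.2.2
                      else if t.2.1 ≠ "" then t.2.1 else t.2.2))
      PySem.Dict.empty
      (List.zip cs
        (List.zip ((List.range (cs.length + 1)).map (fun j => PySem.Str.join " " (cs.take j)))
          (((List.range (cs.length + 1)).map (fun j => PySem.Str.join " " (cs.drop j))).drop 1))) =
    List.foldl (fun (d : PySem.Dict String String) q => d.insert q.1 q.2)
      PySem.Dict.empty
      ((List.zip cs
        (List.zip ((List.range (cs.length + 1)).map (fun j => PySem.Str.join " " (cs.take j)))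
          (((List.range (cs.length + 1)).map (fun j => PySem.Str.join " " (cs.drop j))).drop 1))).map
        (fun t => (t.1, if t.2.1 ≠ "" ∧ t.2.2 ≠ "" then t.2.1 ++ " " ++ t.2.2
                        else if t.2.1 ≠ "" then t.2.1 else t.2.2)))
    from (List.foldl_map
      (f := fun (t : String × String × String) => (t.1,
          if t.2.1 ≠ "" ∧ t.2.2 ≠ "" then t.2.1 ++ " " ++ t.2.2
          else if t.2.1 ≠ "" then t.2.1 else t.2.2))
      (g := fun (d : PySem.Dict String String) q => d.insert q.1 q.2)).symm]
  congr 1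
  congr 1
  apply List.ext_getElem
  · simp [PySem.List.length_enumerate, hm]
  intro i h1 h2
  simp only [List.length_map, PySem.List.length_enumerate] at h1
  have hi : i < chunks.length := h1
  have hics : i < cs.length := by omega
  have hen : (PySem.List.enumerate chunks 0)[i]'(by simpa [PySem.List.length_enumerate] using hi) = ((i : Int), chunks[i]) := by
    have h0 := PySem.List.getElem?_enumerate chunks 0 i
    rw [List.getElem?_eq_getElem hi, List.getElem?_eq_getElem (by simpa [PySem.List.length_enumerate] using hi)] at h0
    simpa using Option.some.inj h0
  rw [List.getElem_map, List.getElem_map, hen, List.getElem_zip, List.getElem_zip]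
  simp only
  rw [PySem.List.slice_to _ (by positivity), Int.toNat_natCast,
      show ((i : Int) + 1) = ((i + 1 : Nat) : Int) by push_cast; ring,
      PySem.List.slice_from _ (by positivity), Int.toNat_natCast]
  simp only [List.getElem_map, List.getElem_drop, List.getElem_range]
  refine Prod.ext ?_ ?_
  · simp only [hcs, List.getElem_map]
  · simp only
    rw [show (1 + i) = i + 1 from by omega, hcs]
    exact pv_value_eq chunks i hc hw

theorem pv_chunk_facts (ws : List String) (n : Int) (hn : 0 < n)
    (hwne : ∀ w ∈ ws, w ≠ "") :
    ∀ c ∈ (PySem.List.pyRange 0 (ws.length : Int) n).map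
        (fun i => PySem.List.slice ws (some i) (some (i + n))),
      c ≠ [] ∧ ∀ w ∈ c, w ≠ "" := by
  intro c hcm
  rcases List.mem_map.mp hcm with ⟨i, hiR, rfl⟩
  obtain ⟨h0, hlt, -⟩ := by
    have := (PySem.List.mem_pyRange_iff_of_pos hn i).mp hiR
    simpa using this
  obtain ⟨k, rfl⟩ : ∃ k : Nat, i = (k : Int) := ⟨i.toNat, (Int.toNat_of_nonneg h0).symm⟩
  have hkL : k < ws.length := by exact_mod_cast hlt
  have hslice : PySem.List.slice ws (some (k : Int)) (some ((k : Int) + n)) =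
      List.take n.toNat (List.drop k ws) := by
    rw [show ((k : Int) + n) = ((k + n.toNat : Nat) : Int) by
          push_cast [Int.toNat_of_nonneg (le_of_lt hn)]; ring,
        PySem.List.slice_natCast, show k + n.toNat - k = n.toNat by omega]
  rw [hslice]
  constructor
  · intro hnil
    rcases List.take_eq_nil_iff.mp hnil with h | h
    · omega
    · exact absurd (List.drop_eq_nil_iff.mp h) (by omega)
  · intro w hwm
    exact hwne w (List.mem_of_mem_drop (List.mem_of_mem_take hwm))

-- ===== VERDICT (by name: the statement is the Claim_ definition above) =====
theorem multiple_queries_spec : Claim_equal_multiple_queries := by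
  intro query n hdom hpre
  unfold Pre_multiple_queries at hpre
  show multiple_queries query n = multiple_queries_alt query n
  simp only [multiple_queries, multiple_queries_alt]
  rcases lt_or_gt_of_ne hpre with hn | hn
  · have hRgen : ∀ L : Int, 0 ≤ L → PySem.List.pyRange 0 L n = [] := by
      intro L hL0
      simp [PySem.List.pyRange, hpre, not_lt.mpr (le_of_lt hn), not_lt.mpr hL0]
    rw [hRgen ((PySem.Str.split₀ (PySem.Str.strip query)).length : Int) (Int.natCast_nonneg _)]
    rfl
  · have hfacts := pv_chunk_facts (PySem.Str.split₀ (PySem.Str.strip query)) n hn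
      (pv_split₀_ne_empty (PySem.Str.strip query))
    rw [show (PySem.List.pyRange 0 ((PySem.Str.split₀ (PySem.Str.strip query)).length : Int) n).map
          (fun i => PySem.Str.join " " (PySem.List.slice (PySem.Str.split₀ (PySem.Str.strip query)) (some i) (some (i + n)))) =
        ((PySem.List.pyRange 0 ((PySem.Str.split₀ (PySem.Str.strip query)).length : Int) n).map
          (fun i => PySem.List.slice (PySem.Str.split₀ (PySem.Str.strip query)) (some i) (some (i + n)))).map (PySem.Str.join " ")
      from by rw [List.map_map]; rfl]
    exact pv_main _ (fun c hc => (hfacts c hc).1) (fun c hc => (hfacts c hc).2)
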